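-- pv_equiv track=rewrite | github.com/seungjaeryanlee/rldb | generate_md_atari.py | _split_entries_by_variants
-- ===== SOURCE A (Python) =====
-- def _split_entries_by_variants(entries):
--     """Split entries by their variants."""
--     human_entries = []
--     noop_entries = []
--     unspecified_entries = []
--     for entry in entries:
--         if 'env-variant' not in entry:
--             unspecified_entries.append(entry)
--         elif entry['env-variant'] == 'Human start':
--             human_entries.append(entry)
--         elif entry['env-variant'] == 'No-op start':
--             noop_entries.append(entry)
--         else:
--             unspecified_entries.append(entry)
--
--     return human_entries, noop_entries, unspecified_entries
-- ===== SOURCE B (Python) =====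
-- def _split_entries_by_variants(entries):
--     """Split entries by their variants, one filtering pass per output list."""
--     human_entries = [e for e in entries if e.get('env-variant') == 'Human start']
--     noop_entries = [e for e in entries if e.get('env-variant') == 'No-op start']
--     unspecified_entries = [e for e in entries
--                            if e.get('env-variant') not in ('Human start', 'No-op start')]
--     return human_entries, noop_entries, unspecified_entries
-- ===== Notes on version B (the rewrite author's own statement) =====
-- stated objective: simpler
-- what changed: Replaces the single branching accumulator loop by three independent filtering passes over entries, one comprehension per output list, with the unspecified list taken as the exact complement (missing key or unrecognized value).
import Mathlib
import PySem

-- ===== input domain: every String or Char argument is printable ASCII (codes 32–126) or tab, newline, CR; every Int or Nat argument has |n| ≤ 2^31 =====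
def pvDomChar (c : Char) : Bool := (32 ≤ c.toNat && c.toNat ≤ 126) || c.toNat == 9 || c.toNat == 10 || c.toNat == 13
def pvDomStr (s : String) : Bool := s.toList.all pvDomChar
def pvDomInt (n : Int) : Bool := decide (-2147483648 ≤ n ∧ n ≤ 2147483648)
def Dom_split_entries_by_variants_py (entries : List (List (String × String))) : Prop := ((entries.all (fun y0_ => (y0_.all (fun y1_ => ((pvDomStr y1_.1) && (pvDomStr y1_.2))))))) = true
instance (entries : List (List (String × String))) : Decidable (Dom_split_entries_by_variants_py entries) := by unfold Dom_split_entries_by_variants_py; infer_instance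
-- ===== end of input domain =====

-- B replaces A's single branching accumulator loop by three independent filtering passes (simpler decomposition, same O(n) cost).

-- ===== PORT A =====
-- dict lookup (first match in the association list), shared dict primitive
def pvLookup (entry : List (String × String)) (k : String) : Option String :=
  (entry.find? (fun p => p.1 == k)).map (·.2)

-- A's loop body (if/elif/elif/else)
def pvStep (s : (List (List (String × String))) × (List (List (String × String))) × (List (List (String × String)))) (entry : List (String × String)) : (List (List (String × String))) × (List (List (String × String))) × (List (List (String × String))) :=
  match pvLookup entry "env-variant" with
  | none => (s.1, s.2.1, s.2.2 ++ [entry])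
  | some v =>
    if v == "Human start" then (s.1 ++ [entry], s.2.1, s.2.2)
    else if v == "No-op start" then (s.1, s.2.1 ++ [entry], s.2.2)
    else (s.1, s.2.1, s.2.2 ++ [entry])

-- A: one pass over entries, appending to three accumulators
def split_entries_by_variants_py (entries : List (List (String × String))) : (List (List (String × String))) × (List (List (String × String))) × (List (List (String × String))) :=
  entries.foldl pvStep ([], [], [])

-- ===== PORT B =====
-- B: three independent filters over entries
def split_entries_by_variants_py_alt (entries : List (List (String × String))) : (List (List (String × String))) × (List (List (String × String))) × (List (List (String × String))) :=
  (entries.filter (fun e => pvLookup e "env-variant" == some "Human start"),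
   entries.filter (fun e => pvLookup e "env-variant" == some "No-op start"),
   entries.filter (fun e =>
     !(pvLookup e "env-variant" == some "Human start" ||
       pvLookup e "env-variant" == some "No-op start")))

-- ===== PRECONDITION & SPEC =====
def Spec_split_entries_by_variants_py (entries : List (List (String × String))) (out : (List (List (String × String))) × (List (List (String × String))) × (List (List (String × String)))) : Prop := out = split_entries_by_variants_py_alt entries
instance (entries : List (List (String × String))) (out : (List (List (String × String))) × (List (List (String × String))) × (List (List (String × String)))) : Decidable (Spec_split_entries_by_variants_py entries out) := by unfold Spec_split_entries_by_variants_py; infer_instance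

-- ===== CLAIM (what is proved, stated in full; the proofs are below) =====
def Claim_equal_split_entries_by_variants_py : Prop := ∀ (entries : List (List (String × String))), Dom_split_entries_by_variants_py entries → Spec_split_entries_by_variants_py entries (split_entries_by_variants_py entries)

-- ===== LEMMAS AND PROOFS =====
-- invariant: A's foldl from any accumulator appends B's three filters
theorem pv_fold_inv (entries : List (List (String × String)))
    (h n u : List (List (String × String))) :
    entries.foldl pvStep (h, n, u)
    = (h ++ entries.filter (fun e => pvLookup e "env-variant" == some "Human start"),
       n ++ entries.filter (fun e => pvLookup e "env-variant" == some "No-op start"),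
       u ++ entries.filter (fun e =>
         !(pvLookup e "env-variant" == some "Human start" ||
           pvLookup e "env-variant" == some "No-op start"))) := by
  induction entries generalizing h n u with
  | nil => simp
  | cons e es ih =>
    simp only [List.foldl_cons, List.filter_cons]
    cases hv : pvLookup e "env-variant" with
    | none =>
      rw [show pvStep (h, n, u) e = (h, n, u ++ [e]) from by simp [pvStep, hv], ih]
      simp
    | some v =>
      by_cases h1 : v = "Human start"
      · subst h1
        rw [show pvStep (h, n, u) e = (h ++ [e], n, u) from by simp [pvStep, hv], ih]
        simp
      · by_cases h2 : v = "No-op start"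
        · subst h2
          rw [show pvStep (h, n, u) e = (h, n ++ [e], u) from by simp [pvStep, hv], ih]
          simp [h1]
        · rw [show pvStep (h, n, u) e = (h, n, u ++ [e]) from by simp [pvStep, hv, h1, h2], ih]
          simp [h1, h2]

-- ===== VERDICT (by name: the statement is the Claim_ definition above) =====
theorem split_entries_by_variants_py_spec : Claim_equal_split_entries_by_variants_py := by
  intro entries _
  unfold Spec_split_entries_by_variants_py split_entries_by_variants_py split_entries_by_variants_py_alt
  simpa using pv_fold_inv entries [] [] []
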